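-- pv_equiv track=rewrite | github.com/Markit125/cash_outlay_bot | BotFunctions/processing.py | get_new_tag
-- ===== SOURCE A (Python) =====
-- def get_new_tag(active_tags, user_tags, offset=0):
--     for tag in active_tags:
--         if tag not in user_tags:
--             if offset:
--                 offset -= 1
--                 continue
--             return tag
--     return None
-- ===== SOURCE B (Python) =====
-- def get_new_tag(active_tags, user_tags, offset=0):
--     filtered = [t for t in active_tags if t not in user_tags]
--     if offset < 0 or offset >= len(filtered):
--         return None
--     return filtered[offset]
-- ===== Notes on version B (the rewrite author's own statement) =====
-- stated objective: simpler
-- what changed: Replaces the lazy early-return loop with a running countdown counter by materializing the filtered list once and indexing it under an explicit sign/bounds guard.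
import Mathlib
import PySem

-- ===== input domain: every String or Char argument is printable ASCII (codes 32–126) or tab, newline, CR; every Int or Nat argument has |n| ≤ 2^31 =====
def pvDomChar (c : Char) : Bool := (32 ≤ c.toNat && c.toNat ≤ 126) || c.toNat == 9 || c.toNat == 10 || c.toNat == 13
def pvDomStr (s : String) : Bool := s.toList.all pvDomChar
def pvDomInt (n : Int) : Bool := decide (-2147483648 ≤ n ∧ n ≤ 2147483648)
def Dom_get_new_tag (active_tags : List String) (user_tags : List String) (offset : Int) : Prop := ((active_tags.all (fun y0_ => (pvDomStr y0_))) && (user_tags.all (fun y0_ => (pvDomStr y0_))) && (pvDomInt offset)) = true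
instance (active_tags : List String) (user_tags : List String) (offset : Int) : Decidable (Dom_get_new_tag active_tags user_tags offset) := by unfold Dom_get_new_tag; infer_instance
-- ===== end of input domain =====

-- B replaces A's lazy early-return loop with a countdown counter by an eager filter-then-index with an explicit sign/bounds guard (same cost, plainer decomposition).
-- ===== PORT A =====
-- A-side: the original lazy loop with a running countdown counter
def get_new_tag_loop (user_tags : List String) : List String → Int → Option String
  | [], _ => none
  | t :: ts, off =>
    if ¬ user_tags.contains t then
      if off ≠ 0 then get_new_tag_loop user_tags ts (off - 1)
      else some t
    else get_new_tag_loop user_tags ts off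

def get_new_tag (active_tags : List String) (user_tags : List String) (offset : Int) : Option String :=
  get_new_tag_loop user_tags active_tags offset

-- ===== PORT B =====
-- B-side: materialize the filtered list, then index under a sign/bounds guard
def get_new_tag_alt (active_tags : List String) (user_tags : List String) (offset : Int) : Option String :=
  let filtered := active_tags.filter (fun t => !(user_tags.contains t))
  if offset < 0 ∨ (filtered.length : Int) ≤ offset then none
  else PySem.List.pyGet? filtered offset

-- ===== PRECONDITION & SPEC =====
def Spec_get_new_tag (active_tags : List String) (user_tags : List String) (offset : Int) (out : Option String) : Prop := out = get_new_tag_alt active_tags user_tags offset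
instance (active_tags : List String) (user_tags : List String) (offset : Int) (out : Option String) : Decidable (Spec_get_new_tag active_tags user_tags offset out) := by unfold Spec_get_new_tag; infer_instance

-- ===== CLAIM (what is proved, stated in full; the proofs are below) =====
def Claim_equal_get_new_tag : Prop := ∀ (active_tags : List String) (user_tags : List String) (offset : Int), Dom_get_new_tag active_tags user_tags offset → Spec_get_new_tag active_tags user_tags offset (get_new_tag active_tags user_tags offset)

-- ===== LEMMAS AND PROOFS =====

-- ===== VERDICT (by name: the statement is the Claim_ definition above) =====
theorem loop_eq_index (user_tags : List String) (active : List String) (off : Int) :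
    get_new_tag_loop user_tags active off =
      (let F := active.filter (fun t => !(user_tags.contains t));
       if off < 0 ∨ (F.length : Int) ≤ off then none else PySem.List.pyGet? F off) := by
  induction active generalizing off with
  | nil => simp [get_new_tag_loop]
  | cons t ts ih =>
    by_cases hc : t ∈ user_tags
    · simpa [get_new_tag_loop, hc] using ih off
    · by_cases h0 : off = 0
      · subst h0
        simp only [get_new_tag_loop, List.filter_cons]
        simp [hc]
      · have step : get_new_tag_loop user_tags (t :: ts) off
            = get_new_tag_loop user_tags ts (off - 1) := by
          simp [get_new_tag_loop, hc, h0]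
        rw [step, ih (off - 1)]
        simp only [List.filter_cons]
        rw [if_pos (show (!(user_tags.contains t)) = true by simp [hc])]
        simp only [List.length_cons]
        by_cases hneg : off < 0
        · rw [if_pos (by omega), if_pos (by omega)]
        · have hpos : 0 < off := by omega
          by_cases hb : (↑(ts.filter (fun t => !(user_tags.contains t))).length : Int) ≤ off - 1
          · rw [if_pos (Or.inr hb), if_pos (Or.inr (by push_cast at hb ⊢; omega))]
          · rw [if_neg (by omega), if_neg (by push_cast at hb ⊢; omega)]
            have h : off = ((off - 1).toNat : Int) + 1 := by omega
            rw [h, PySem.List.pyGet?_cons_succ]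
            congr 1
            omega

theorem get_new_tag_spec : Claim_equal_get_new_tag := by
  intro a u off _
  show get_new_tag a u off = get_new_tag_alt a u off
  simpa [get_new_tag, get_new_tag_alt] using loop_eq_index u a off
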